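-- pv_equiv track=rewrite | github.com/Nlafaille/algorithm | programprinciples/ws6/Problem3.py | determine_g_state
-- ===== SOURCE A (Python) =====
-- def determine_g_state(text):
--     for index in range(len(text)):
--         if text[index] == "g":
--             is_left_neighbour_g = index > 0 and text[index - 1] == "g"
--             is_right_neighbour_g = index < len(text)-1 and text[index + 1] == "g"
--             if not is_left_neighbour_g and not is_right_neighbour_g:
--                 return False
--     return True
-- ===== SOURCE B (Python) =====
-- def determine_g_state(text):
--     n = len(text)
--     i = 0
--     while i < n:
--         j = i
--         while j < n and text[j] == text[i]:
--             j += 1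
--         if text[i] == "g" and j - i == 1:
--             return False
--         i = j
--     return True
-- ===== Notes on version B (the rewrite author's own statement) =====
-- stated objective: alternative
-- what changed: Replaces the per-index left/right neighbour check with a run-length decomposition: scan maximal runs of identical characters and return False exactly when a run of 'g' has length 1.
import Mathlib
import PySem

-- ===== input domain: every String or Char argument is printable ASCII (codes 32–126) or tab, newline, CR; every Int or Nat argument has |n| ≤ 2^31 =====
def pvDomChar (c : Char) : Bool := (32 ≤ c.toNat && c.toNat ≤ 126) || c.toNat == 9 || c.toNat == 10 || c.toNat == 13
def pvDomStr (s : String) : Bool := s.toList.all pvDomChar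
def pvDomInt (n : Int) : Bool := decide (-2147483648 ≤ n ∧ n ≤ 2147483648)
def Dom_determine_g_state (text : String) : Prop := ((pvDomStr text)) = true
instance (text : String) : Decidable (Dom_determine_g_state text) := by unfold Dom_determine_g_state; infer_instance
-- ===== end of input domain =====

-- B replaces A's per-index neighbour check by a run-length scan (maximal runs of equal
-- characters; False iff some run of 'g' has length 1); same O(n) cost, alternative algorithm.


-- ===== PORT A =====
-- A's loop over range(len(text)): index recursion; text[index±1] accesses are guarded
-- in range by the short-circuit conjunctions, so getD is exact.
def goA (s : List Char) (i : Nat) : Bool :=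
  if i < s.length then
    if s.getD i ' ' == 'g' then
      let left := decide (0 < i) && (s.getD (i - 1) ' ' == 'g')
      let right := decide (i < s.length - 1) && (s.getD (i + 1) ' ' == 'g')
      if !left && !right then false else goA s (i + 1)
    else goA s (i + 1)
  else true
termination_by s.length - i

def determine_g_state (text : String) : Bool := goA text.toList 0

-- ===== PORT B =====
-- Source B's outer while loop: one step per maximal run; the inner while that advances j
-- over the run is takeWhile/dropWhile; 'j - i == 1' is 'the rest of the run is empty'.
def goB (l : List Char) : Bool :=
  match l with
  | [] => true
  | c :: rest =>
    if c == 'g' && rest.takeWhile (· == c) == [] then false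
    else goB (rest.dropWhile (· == c))
termination_by l.length
decreasing_by simp; exact List.length_dropWhile_le _ _

def determine_g_state_alt (text : String) : Bool := goB text.toList

-- ===== PRECONDITION & SPEC =====
def Spec_determine_g_state (text : String) (out : Bool) : Prop := out = determine_g_state_alt text
instance (text : String) (out : Bool) : Decidable (Spec_determine_g_state text out) := by unfold Spec_determine_g_state; infer_instance

-- ===== CLAIM (what is proved, stated in full; the proofs are below) =====
def Claim_equal_determine_g_state : Prop := ∀ (text : String), Dom_determine_g_state text → Spec_determine_g_state text (determine_g_state text)

-- ===== LEMMAS AND PROOFS =====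

-- Reference recursion: walk the list remembering the previous character; a 'g' passes
-- iff the previous or the next character is 'g'.
def fA (prev : Option Char) (l : List Char) : Bool :=
  match l with
  | [] => true
  | c :: rest =>
    if c = 'g' then
      if prev = some 'g' ∨ rest.head? = some 'g' then fA (some c) rest else false
    else fA (some c) rest

-- previous character seen from index i
def prevOf (s : List Char) (i : Nat) : Option Char :=
  if i = 0 then none else some (s.getD (i - 1) ' ')

theorem head?_dropWhile_ne {p : Char → Bool} :
    ∀ (l : List Char) (c : Char), (l.dropWhile p).head? = some c → p c = false := by
  intro l
  induction l with
  | nil => intro c h; simp [List.dropWhile] at h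
  | cons d t ih =>
    intro c h
    by_cases hd : p d
    · rw [List.dropWhile_cons_of_pos hd] at h; exact ih c h
    · rw [List.dropWhile_cons_of_neg hd] at h
      simp at h; subst h; simpa using hd

-- walking through a run of the previous character changes nothing
theorem fA_skip (c : Char) : ∀ (l : List Char),
    fA (some c) l = fA (some c) (l.dropWhile (· == c)) := by
  intro l
  induction l with
  | nil => rfl
  | cons d t ih =>
    by_cases hd : d = c
    · subst hd
      rw [List.dropWhile_cons_of_pos (by simp)]
      rw [← ih]
      by_cases hg : d = 'g'
      · subst hg; simp [fA]
      · simp [fA, hg]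
    · rw [List.dropWhile_cons_of_neg (by simpa using hd)]

theorem fA_eq_goB : ∀ (n : Nat) (l : List Char), l.length ≤ n →
    ∀ (prev : Option Char), (∀ c, prev = some c → l.head? ≠ some c) →
    fA prev l = goB l := by
  intro n
  induction n with
  | zero =>
    intro l hl prev _
    have : l = [] := List.eq_nil_of_length_eq_zero (Nat.le_zero.mp hl)
    subst this; simp [fA, goB]
  | succ n ih =>
    intro l hl prev hprev
    match l with
    | [] => simp [fA, goB]
    | c :: rest =>
      have hpc : prev ≠ some c := by
        intro h; exact hprev c h (by simp)
      have hrest : rest.length ≤ n := Nat.le_of_succ_le_succ hl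
      have htail : (rest.dropWhile (· == c)).length ≤ n :=
        Nat.le_trans (List.length_dropWhile_le _ _) hrest
      have htailhead : ∀ d, (some c : Option Char) = some d →
          (rest.dropWhile (· == c)).head? ≠ some d := by
        intro d hd h
        have := head?_dropWhile_ne rest d h
        simp at this; rw [Option.some.injEq] at hd; exact this hd.symm
      by_cases hg : c = 'g'
      · subst hg
        have hpg : prev ≠ some 'g' := hpc
        match hr : rest with
        | [] =>
          rw [goB]; simp [fA, hpg]
        | d :: t =>
          by_cases hdg : d = 'g'
          · subst hdg
            have h1 : fA prev ('g' :: 'g' :: t) = fA (some 'g') ('g' :: t) := by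
              simp [fA]
            rw [h1, fA_skip 'g' ('g' :: t)]
            have h2 : goB ('g' :: 'g' :: t) = goB (('g' :: t).dropWhile (· == 'g')) := by
              rw [goB]; simp
            rw [h2]
            exact ih _ (Nat.le_trans (List.length_dropWhile_le _ _) hrest)
              (some 'g') (htailhead)
          · have hA : fA prev ('g' :: d :: t) = false := by
              simp [fA, hpg, hdg]
            have hB : goB ('g' :: d :: t) = false := by
              rw [goB]; simp [hdg]
            rw [hA, hB]
      · have h1 : fA prev (c :: rest) = fA (some c) rest := by
          simp [fA, hg]
        rw [h1, fA_skip c rest]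
        have h2 : goB (c :: rest) = goB (rest.dropWhile (· == c)) := by
          rw [goB]; simp [hg]
        rw [h2]
        exact ih _ htail (some c) htailhead

theorem goA_eq_fA : ∀ (k i : Nat) (s : List Char), s.length - i ≤ k →
    goA s i = fA (prevOf s i) (s.drop i) := by
  intro k
  induction k with
  | zero =>
    intro i s hs
    have hge : s.length ≤ i := by omega
    rw [goA]
    simp [Nat.not_lt.mpr hge, List.drop_eq_nil_of_le hge, fA]
  | succ k ih =>
    intro i s hs
    by_cases hi : i < s.length
    · have hdrop : s.drop i = s[i] :: s.drop (i + 1) := List.drop_eq_getElem_cons hi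
      have hgetD : s.getD i ' ' = s[i] := by simp [List.getD, hi]
      have hnext : prevOf s (i + 1) = some s[i] := by
        simp [prevOf, List.getD, hi]
      have hrec := ih (i + 1) s (by omega)
      rw [goA, if_pos hi, hdrop]
      by_cases hg : s[i] = 'g'
      · -- left neighbour condition matches prev, right matches rest.head?
        have hleft : (decide (0 < i) && (s.getD (i - 1) ' ' == 'g'))
            = decide (prevOf s i = some 'g') := by
          by_cases h0 : i = 0
          · subst h0; simp [prevOf]
          · have : 0 < i := Nat.pos_of_ne_zero h0
            simp [prevOf, h0, this, Bool.beq_eq_decide_eq]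
        have hhead : (s.drop (i + 1)).head? = s[i + 1]? := by
          simp [List.head?_drop]
        have hright : (decide (i < s.length - 1) && (s.getD (i + 1) ' ' == 'g'))
            = decide ((s.drop (i + 1)).head? = some 'g') := by
          rw [hhead]
          by_cases hi1 : i + 1 < s.length
          · have : i < s.length - 1 := by omega
            simp [List.getD, hi1, this, Bool.beq_eq_decide_eq]
          · have h2 : ¬ i < s.length - 1 := by omega
            simp [h2, List.getElem?_eq_none (by omega : s.length ≤ i + 1)]
        rw [hgetD, hg]
        simp only [beq_self_eq_true, if_pos]
        rw [fA]
        by_cases hc : prevOf s i = some 'g' ∨ (s.drop (i + 1)).head? = some 'g'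
        · have hL : (!(decide (0 < i) && (s.getD (i - 1) ' ' == 'g'))
              && !(decide (i < s.length - 1) && (s.getD (i + 1) ' ' == 'g'))) = false := by
            rw [hleft, hright]
            rcases hc with h | h <;> simp [h]
          simp only [hL, Bool.false_eq_true, if_false, if_pos hc]
          simp [hrec, hnext, hg]
        · rw [not_or] at hc
          have hL : (!(decide (0 < i) && (s.getD (i - 1) ' ' == 'g'))
              && !(decide (i < s.length - 1) && (s.getD (i + 1) ' ' == 'g'))) = true := by
            rw [hleft, hright, hhead] at *
            simp [hc.1, hc.2]
          
          simp only [hL, if_true]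
          rw [if_neg (by tauto)]
      · rw [hgetD]
        have : (s[i] == 'g') = false := by simpa using hg
        rw [this]
        simp only [Bool.false_eq_true, if_false]
        rw [fA]
        simp only [if_neg hg]
        rw [hrec, hnext]
    · rw [goA, if_neg hi]
      rw [List.drop_eq_nil_of_le (Nat.le_of_not_lt hi)]
      rfl

-- ===== VERDICT (by name: the statement is the Claim_ definition above) =====
theorem determine_g_state_spec : Claim_equal_determine_g_state := by
  intro text _
  unfold Spec_determine_g_state determine_g_state determine_g_state_alt
  rw [goA_eq_fA (text.toList.length) 0 text.toList (by omega)]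
  simp only [List.drop_zero, prevOf, if_pos]
  exact fA_eq_goB text.toList.length text.toList (Nat.le_refl _) none (by simp)
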